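-- pv_equiv track=rewrite | github.com/TylerKienVu/pyautotools | PyautoguiUtility.py | calculateRelativeMovesFromCoord
-- ===== SOURCE A (Python) =====
-- def calculateRelativeMovesFromCoord(x:'int', y:'int', nextMoves:'list<tuple>') ->'list<tuple>':
--     """
--     Takes in a starting coord and a list of destination coordinates.
--     Returns a list of relative move instructions to string together
--     the moves from the start.
--     """
--     relativeMoves = []
--     currentX = x
--     currentY = y
--     for nextMove in nextMoves:
--         relativeMoves.append((nextMove[0]-currentX, nextMove[1]-currentY))
--         currentX = nextMove[0]
--         currentY = nextMove[1]
--     return relativeMoves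
-- ===== SOURCE B (Python) =====
-- def _firstDifferences(seq):
--     """Per-axis discrete difference of a coordinate sequence."""
--     return [seq[i + 1] - seq[i] for i in range(len(seq) - 1)]
--
-- def calculateRelativeMovesFromCoord(x:'int', y:'int', nextMoves:'list<tuple>') ->'list<tuple>':
--     # Structure-of-arrays: project onto axes, take first differences per axis, recombine.
--     xs = [x] + [p[0] for p in nextMoves]
--     ys = [y] + [p[1] for p in nextMoves]
--     return list(zip(_firstDifferences(xs), _firstDifferences(ys)))
-- ===== Notes on version B (the rewrite author's own statement) =====
-- stated objective: alternative
-- what changed: Instead of one loop carrying currentX/currentY state over coordinate pairs, B transposes to a structure-of-arrays layout: it projects the prepended point sequence onto separate x and y axis lists, takes index-based first differences of each axis independently, and zips the two difference lists back into tuples.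
import Mathlib
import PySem

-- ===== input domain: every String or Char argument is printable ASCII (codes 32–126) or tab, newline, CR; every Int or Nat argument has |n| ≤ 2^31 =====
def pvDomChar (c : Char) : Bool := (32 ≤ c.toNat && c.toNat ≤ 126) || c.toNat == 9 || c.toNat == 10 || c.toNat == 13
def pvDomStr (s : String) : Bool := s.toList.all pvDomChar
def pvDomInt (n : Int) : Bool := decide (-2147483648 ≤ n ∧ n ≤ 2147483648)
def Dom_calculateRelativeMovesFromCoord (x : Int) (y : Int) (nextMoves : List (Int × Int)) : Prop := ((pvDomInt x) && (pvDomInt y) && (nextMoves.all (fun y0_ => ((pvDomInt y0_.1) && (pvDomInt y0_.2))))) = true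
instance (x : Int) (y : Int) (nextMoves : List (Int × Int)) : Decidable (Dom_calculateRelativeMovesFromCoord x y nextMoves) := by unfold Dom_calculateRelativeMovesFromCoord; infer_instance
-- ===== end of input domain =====

-- B replaces A's stateful currentX/currentY loop over pairs with a structure-of-arrays decomposition: per-axis projection, index-based first differences per axis, then zip (alternative decomposition; same cost).


-- ===== PORT A =====
-- accumulator loop: state = (relativeMoves, currentX, currentY)
def calculateRelativeMovesFromCoord (x : Int) (y : Int) (nextMoves : List (Int × Int)) : List (Int × Int) :=
  (nextMoves.foldl
    (fun (st : List (Int × Int) × Int × Int) nextMove =>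
      (st.1 ++ [(nextMove.1 - st.2.1, nextMove.2 - st.2.2)], nextMove.1, nextMove.2))
    ([], x, y)).1

-- ===== PORT B =====
-- [seq[i+1] - seq[i] for i in range(len(seq)-1)]  (indices always in range, so getD is exact)
def pvFirstDifferences (seq : List Int) : List Int :=
  (List.range (seq.length - 1)).map (fun i => seq.getD (i + 1) 0 - seq.getD i 0)

-- B: project onto axes, first differences per axis, zip back into tuples
def calculateRelativeMovesFromCoord_alt (x : Int) (y : Int) (nextMoves : List (Int × Int)) : List (Int × Int) :=
  let xs := x :: nextMoves.map (fun p => p.1)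
  let ys := y :: nextMoves.map (fun p => p.2)
  (pvFirstDifferences xs).zip (pvFirstDifferences ys)

-- ===== PRECONDITION & SPEC =====
def Spec_calculateRelativeMovesFromCoord (x : Int) (y : Int) (nextMoves : List (Int × Int)) (out : List (Int × Int)) : Prop := out = calculateRelativeMovesFromCoord_alt x y nextMoves
instance (x : Int) (y : Int) (nextMoves : List (Int × Int)) (out : List (Int × Int)) : Decidable (Spec_calculateRelativeMovesFromCoord x y nextMoves out) := by unfold Spec_calculateRelativeMovesFromCoord; infer_instance

-- ===== CLAIM (what is proved, stated in full; the proofs are below) =====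
def Claim_equal_calculateRelativeMovesFromCoord : Prop := ∀ (x : Int) (y : Int) (nextMoves : List (Int × Int)), Dom_calculateRelativeMovesFromCoord x y nextMoves → Spec_calculateRelativeMovesFromCoord x y nextMoves (calculateRelativeMovesFromCoord x y nextMoves)

-- ===== LEMMAS AND PROOFS =====
theorem pvFirstDifferences_cons2 (a b : Int) (r : List Int) :
    pvFirstDifferences (a :: b :: r) = (b - a) :: pvFirstDifferences (b :: r) := by
  simp [pvFirstDifferences, List.range_succ_eq_map, List.map_map, Function.comp]

theorem pvAlt_cons (x y : Int) (m : Int × Int) (tl : List (Int × Int)) :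
    calculateRelativeMovesFromCoord_alt x y (m :: tl)
      = (m.1 - x, m.2 - y) :: calculateRelativeMovesFromCoord_alt m.1 m.2 tl := by
  simp [calculateRelativeMovesFromCoord_alt, pvFirstDifferences_cons2]

theorem pvFold_eq (nextMoves : List (Int × Int)) : ∀ (acc : List (Int × Int)) (x y : Int),
    (nextMoves.foldl
      (fun (st : List (Int × Int) × Int × Int) nextMove =>
        (st.1 ++ [(nextMove.1 - st.2.1, nextMove.2 - st.2.2)], nextMove.1, nextMove.2))
      (acc, x, y)).1
    = acc ++ calculateRelativeMovesFromCoord_alt x y nextMoves := by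
  induction nextMoves with
  | nil => intro acc x y; simp [calculateRelativeMovesFromCoord_alt, pvFirstDifferences]
  | cons hd tl ih =>
      intro acc x y
      rw [List.foldl_cons, ih, pvAlt_cons]
      simp

-- ===== VERDICT (by name: the statement is the Claim_ definition above) =====
theorem calculateRelativeMovesFromCoord_spec : Claim_equal_calculateRelativeMovesFromCoord := by
  intro x y nextMoves _
  show calculateRelativeMovesFromCoord x y nextMoves = calculateRelativeMovesFromCoord_alt x y nextMoves
  simpa [calculateRelativeMovesFromCoord] using pvFold_eq nextMoves [] x y
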